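-- pv_equiv track=rewrite | github.com/soenmie/code | py/f.py | calc_min_rectangle_count
-- ===== SOURCE A (Python) =====
-- def calc_min_rectangle_count(values):
--     stack, result = [], 0
--     for value in values:
--         while stack and stack[-1] > value:
--             stack.pop()
--             result += 1
--         if not stack or stack[-1] < value:
--             stack.append(value)
--     result += len(stack)
--     return result
-- ===== SOURCE B (Python) =====
-- def calc_min_rectangle_count(values):
--     # Divide and conquer on the minimum of each span (Cartesian-tree style):
--     # a span contributes one rectangle when its minimum rises above the base
--     # level below it, then the sub-spans left and right of that minimum are
--     # solved with the minimum as the new base.  The loop continues into the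
--     # larger side and recurses only into the smaller one (depth O(log n)).
--     def count(seg, base):
--         total = 0
--         while seg:
--             m = min(seg)
--             i = seg.index(m)
--             if base is None or m > base:
--                 total += 1
--             left, right = seg[:i], seg[i + 1:]
--             if len(left) <= len(right):
--                 total += count(left, m)
--                 seg, base = right, m
--             else:
--                 total += count(right, m)
--                 seg, base = left, m
--         return total
--
--     return count(values, None)
-- ===== Notes on version B (the rewrite author's own statement) =====
-- stated objective: alternative
-- what changed: Replaces the left-to-right monotonic-stack sweep by divide-and-conquer on the span minimum (Cartesian-tree decomposition): a span contributes one rectangle when its minimum exceeds the base below it, then the sub-spans left and right of the minimum are solved with that minimum as the new base; the loop walks the larger side and recurses only into the smaller one so the depth stays logarithmic.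
import Mathlib
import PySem

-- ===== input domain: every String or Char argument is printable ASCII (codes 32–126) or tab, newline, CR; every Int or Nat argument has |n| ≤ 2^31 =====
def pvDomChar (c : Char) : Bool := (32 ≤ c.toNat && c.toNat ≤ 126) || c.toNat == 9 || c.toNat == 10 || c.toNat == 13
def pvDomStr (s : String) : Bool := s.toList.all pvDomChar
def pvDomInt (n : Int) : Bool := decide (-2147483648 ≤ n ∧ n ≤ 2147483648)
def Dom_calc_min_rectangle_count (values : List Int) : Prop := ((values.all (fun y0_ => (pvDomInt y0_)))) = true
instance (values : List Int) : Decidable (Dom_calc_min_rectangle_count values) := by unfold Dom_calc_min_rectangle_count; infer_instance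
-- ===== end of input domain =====

-- B replaces A's monotonic-stack sweep by divide-and-conquer on the span minimum
-- (an alternative algorithm of the same value, proved equal on every input; not faster).

-- ===== PORT A =====
-- A's Python stack appends/pops/peeks at the END of the list; the port keeps the
-- stack head-first (head = Python's stack[-1]), the standard faithful encoding.
-- 'while stack and stack[-1] > value: stack.pop(); result += 1', recursion on the stack
def pvPopLoop (v : Int) : List Int → Int → List Int × Int
  | [], r => ([], r)
  | t :: s, r => if t > v then pvPopLoop v s (r + 1) else (t :: s, r)

-- one iteration of 'for value in values'
def pvStepA (st : List Int × Int) (v : Int) : List Int × Int :=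
  match pvPopLoop v st.1 st.2 with
  | ([], r) => (v :: [], r)                                       -- 'if not stack: … append'
  | (t :: s', r) => if t < v then (v :: t :: s', r) else (t :: s', r)   -- 'elif stack[-1] < value: append'

def calc_min_rectangle_count (values : List Int) : Int :=
  let st := values.foldl pvStepA ([], 0)
  st.2 + (st.1.length : Int)

-- ===== PORT B =====
-- Source B's count(seg, base) with base None = Option.none; min(seg) is the running
-- minimum (PySem: min with no key IS the running-min loop), seg.index(m) is idxOf.
-- The Python while loop continues into the larger side and recurses into the
-- smaller one; here the loop step is the structural recursive call on that larger side.
-- termination helpers for pvCountB (cited by name in decreasing_by)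
theorem pv_foldlMin_mem (v : Int) (vs : List Int) : List.foldl min v vs ∈ v :: vs := by
  rcases PySem.List.foldl_min_mem vs v with h | h
  · rw [h]; exact List.mem_cons_self
  · exact List.mem_cons_of_mem _ h

theorem pv_take_lt (v : Int) (vs : List Int) :
    ((v :: vs).take (List.idxOf (List.foldl min v vs) (v :: vs))).length < (v :: vs).length := by
  have hi := List.idxOf_lt_length_of_mem (pv_foldlMin_mem v vs)
  simp only [List.length_take, List.length_cons] at *
  omega

theorem pv_drop_lt (v : Int) (vs : List Int) :
    ((v :: vs).drop (List.idxOf (List.foldl min v vs) (v :: vs) + 1)).length < (v :: vs).length := by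
  simp only [List.length_drop, List.length_cons]
  omega

def pvCountB : List Int → Option Int → Int
  | [], _ => 0
  | v :: vs, base =>
    let m := vs.foldl min v                              -- m = min(seg)
    let i := (v :: vs).idxOf m                           -- i = seg.index(m)
    let left := (v :: vs).take i                         -- seg[:i]
    let right := (v :: vs).drop (i + 1)                  -- seg[i+1:]
    (if base.all (fun b => b < m) then 1 else 0) +       -- 'if base is None or m > base'
      (if left.length ≤ right.length then
        pvCountB left (some m) + pvCountB right (some m)
      else
        pvCountB right (some m) + pvCountB left (some m))
  termination_by seg _ => seg.length
  decreasing_by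
    all_goals simp only [List.foldl_attach]
    all_goals first
      | exact pv_take_lt v vs
      | exact pv_drop_lt v vs

def calc_min_rectangle_count_alt (values : List Int) : Int :=
  pvCountB values none

-- ===== PRECONDITION & SPEC =====
def Spec_calc_min_rectangle_count (values : List Int) (out : Int) : Prop := out = calc_min_rectangle_count_alt values
instance (values : List Int) (out : Int) : Decidable (Spec_calc_min_rectangle_count values out) := by unfold Spec_calc_min_rectangle_count; infer_instance

-- ===== CLAIM (what is proved, stated in full; the proofs are below) =====
def Claim_equal_calc_min_rectangle_count : Prop := ∀ (values : List Int), Dom_calc_min_rectangle_count values → Spec_calc_min_rectangle_count values (calc_min_rectangle_count values)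

-- ===== LEMMAS AND PROOFS =====

-- Abstract model of A's loop body on one value: the new stack is always
-- the value on top of the strictly smaller survivors.
def pvPst (s : List Int) (v : Int) : List Int := v :: s.filter (fun y => y < v)

-- Abstract count of A's pushes: A's final result equals the number of pushes.
def pvP : List Int → List Int → Int
  | [], _ => 0
  | v :: vs, s => (if v ∈ s then 0 else 1) + pvP vs (pvPst s v)

-- stack evolution across a whole prefix
def pvS (vs s : List Int) : List Int := vs.foldl pvPst s

theorem pvPst_pairwise {s : List Int} (v : Int) (hs : List.Pairwise (· > ·) s) :
    List.Pairwise (· > ·) (pvPst s v) := by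
  unfold pvPst
  refine List.pairwise_cons.2 ⟨?_, hs.filter _⟩
  intro y hy
  simpa using (List.mem_filter.1 hy).2


theorem pv_not_mem_take_idxOf (a : Int) (xs : List Int) :
    a ∉ xs.take (List.idxOf a xs) := by
  induction xs with
  | nil => simp
  | cons x xs ih =>
    by_cases hx : x = a
    · subst hx; simp [List.idxOf_cons_self]
    · rw [List.idxOf_cons_ne _ hx, List.take_succ_cons]
      intro hmem
      rcases List.mem_cons.1 hmem with h | h
      · exact hx h.symm
      · exact ih h

theorem pv_split (xs : List Int) (a : Int) (h : a ∈ xs) :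
    xs = xs.take (List.idxOf a xs) ++ a :: xs.drop (List.idxOf a xs + 1) := by
  have hi := List.idxOf_lt_length_of_mem h
  conv_lhs => rw [← List.take_append_drop (List.idxOf a xs) xs]
  rw [List.drop_eq_getElem_cons hi, List.getElem_idxOf hi]

theorem pvStepA_fst (v : Int) : ∀ (s : List Int) (r : Int), List.Pairwise (· > ·) s →
    (pvStepA (s, r) v).1 = pvPst s v := by
  intro s
  induction s with
  | nil => intro r _; simp [pvStepA, pvPopLoop, pvPst]
  | cons t s' ih =>
    intro r hs
    have hts : ∀ y ∈ s', y < t := fun y hy => (List.pairwise_cons.1 hs).1 y hy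
    have hs' := (List.pairwise_cons.1 hs).2
    rcases lt_trichotomy t v with h | h | h
    · have hfil : s'.filter (fun y => decide (y < v)) = s' :=
        List.filter_eq_self.2 (fun y hy => decide_eq_true ((hts y hy).trans h))
      simp [pvStepA, pvPopLoop, pvPst, lt_asymm h, h, hfil]
    · subst h
      have hfil : s'.filter (fun y => decide (y < t)) = s' :=
        List.filter_eq_self.2 (fun y hy => decide_eq_true (hts y hy))
      simp [pvStepA, pvPopLoop, pvPst, hfil]
    · have hpop : pvStepA (t :: s', r) v = pvStepA (s', r + 1) v := by
        simp [pvStepA, pvPopLoop, h]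
      rw [hpop, ih (r + 1) hs']
      simp [pvPst, lt_asymm h]

theorem pvStepA_sum (v : Int) : ∀ (s : List Int) (r : Int), List.Pairwise (· > ·) s →
    (pvStepA (s, r) v).2 + (((pvStepA (s, r) v).1.length : Int)) =
      r + (s.length : Int) + (if v ∈ s then 0 else 1) := by
  intro s
  induction s with
  | nil => intro r _; simp [pvStepA, pvPopLoop]
  | cons t s' ih =>
    intro r hs
    have hts : ∀ y ∈ s', y < t := fun y hy => (List.pairwise_cons.1 hs).1 y hy
    have hs' := (List.pairwise_cons.1 hs).2
    rcases lt_trichotomy t v with h | h | h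
    · have hv : v ∉ t :: s' := by
        intro hv
        rcases List.mem_cons.1 hv with h' | h'
        · exact lt_irrefl v (h' ▸ h)
        · exact lt_irrefl v ((hts v h').trans h)
      simp [pvStepA, pvPopLoop, lt_asymm h, h, hv]
      ring
    · subst h
      simp [pvStepA, pvPopLoop]
    · have hpop : pvStepA (t :: s', r) v = pvStepA (s', r + 1) v := by
        simp [pvStepA, pvPopLoop, h]
      have hne : v ≠ t := fun he => lt_irrefl v (he ▸ h)
      have hv : (v ∈ t :: s') ↔ (v ∈ s') := by simp [List.mem_cons, hne]
      rw [hpop, ih (r + 1) hs']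
      rw [if_congr hv rfl rfl]
      simp only [List.length_cons]
      push_cast
      ring

theorem pvFoldA (vs : List Int) : ∀ (s : List Int) (r : Int), List.Pairwise (· > ·) s →
    (vs.foldl pvStepA (s, r)).2 + (((vs.foldl pvStepA (s, r)).1.length : Int)) =
      r + (s.length : Int) + pvP vs s := by
  induction vs with
  | nil => intro s r _; simp [pvP]
  | cons v vs ih =>
    intro s r hs
    have h1 := pvStepA_fst v s r hs
    have h2 := pvStepA_sum v s r hs
    have hp : List.Pairwise (· > ·) (pvStepA (s, r) v).1 := by
      rw [h1]; exact pvPst_pairwise v hs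
    have h3 := ih (pvStepA (s, r) v).1 (pvStepA (s, r) v).2 hp
    simp only [List.foldl_cons, pvP]
    rw [← Prod.mk.eta (p := pvStepA (s, r) v)] at h3 ⊢
    rw [h3, h1]
    rw [h1] at h2
    linarith [h2]

theorem pvA_eq_P (values : List Int) : calc_min_rectangle_count values = pvP values [] := by
  have h := pvFoldA values [] 0 (by simp)
  simpa [calc_min_rectangle_count] using h

theorem pvP_append (xs : List Int) : ∀ (ys s : List Int),
    pvP (xs ++ ys) s = pvP xs s + pvP ys (pvS xs s) := by
  induction xs with
  | nil => intro ys s; simp [pvP, pvS]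
  | cons x xs ih =>
    intro ys s
    simp only [List.cons_append, pvP, pvS, List.foldl_cons]
    rw [ih]
    simp only [pvS]
    ring

theorem pvS_high (m : Int) (xs : List Int) : ∀ (t s0 : List Int),
    (∀ v ∈ xs, m < v) → (∀ y ∈ s0, y ≤ m) → (∀ y ∈ t, m < y) →
    ∃ t', pvS xs (t ++ s0) = t' ++ s0 ∧ ∀ y ∈ t', m < y := by
  induction xs with
  | nil => intro t s0 _ _ ht; exact ⟨t, rfl, ht⟩
  | cons x xs ih =>
    intro t s0 hxs hs0 ht
    have hxm : m < x := hxs x List.mem_cons_self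
    have hfil : s0.filter (fun y => decide (y < x)) = s0 :=
      List.filter_eq_self.2 (fun y hy => decide_eq_true (lt_of_le_of_lt (hs0 y hy) hxm))
    have hstep : pvPst (t ++ s0) x = (x :: t.filter (fun y => decide (y < x))) ++ s0 := by
      simp [pvPst, List.filter_append, hfil]
    have ht2 : ∀ y ∈ x :: t.filter (fun y => decide (y < x)), m < y := by
      intro y hy
      rcases List.mem_cons.1 hy with h | h
      · exact h ▸ hxm
      · exact ht y (List.mem_of_mem_filter h)
    have := ih (x :: t.filter (fun y => decide (y < x))) s0
      (fun v hv => hxs v (List.mem_cons_of_mem _ hv)) hs0 ht2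
    simpa [pvS, List.foldl_cons, hstep] using this

theorem pvCountB_canon (v : Int) (vs : List Int) (b : Option Int) :
    pvCountB (v :: vs) b =
      (if b.all (fun x => x < vs.foldl min v) then 1 else 0) +
        pvCountB ((v :: vs).take ((v :: vs).idxOf (vs.foldl min v))) (some (vs.foldl min v)) +
        pvCountB ((v :: vs).drop ((v :: vs).idxOf (vs.foldl min v) + 1)) (some (vs.foldl min v)) := by
  rw [pvCountB]
  split <;> split <;> ring

theorem pvMain : ∀ (n : Nat) (vs : List Int) (b : Option Int) (s : List Int),
    vs.length ≤ n → List.Pairwise (· > ·) s →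
    (match b with
     | none => s = []
     | some x => (∀ y ∈ s, y ≤ x) ∧ (∀ v ∈ vs, x ≤ v) ∧ (x ∈ s ∨ ∀ v ∈ vs, x < v)) →
    pvCountB vs b = pvP vs s := by
  intro n
  induction n with
  | zero =>
    intro vs b s hlen _ _
    have hnil : vs = [] := List.eq_nil_of_length_eq_zero (Nat.le_zero.1 hlen)
    subst hnil
    simp [pvCountB, pvP]
  | succ n ih =>
    intro vs b s hlen hsPW hb
    rcases vs with _ | ⟨v, vs'⟩
    · simp [pvCountB, pvP]
    rw [pvCountB_canon]
    set m := List.foldl min v vs' with hm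
    set L := List.idxOf m (v :: vs') with hL
    have hmem : m ∈ v :: vs' := by
      rcases PySem.List.foldl_min_mem vs' v with h | h
      · rw [hm, h]; exact List.mem_cons_self
      · exact List.mem_cons_of_mem _ h
    have hmle : ∀ x ∈ v :: vs', m ≤ x := by
      intro x hx
      have h := PySem.List.foldl_min_le vs' v
      rcases List.mem_cons.1 hx with h' | h'
      · rw [h', hm]; exact h.1
      · rw [hm]; exact h.2 x h'
    have hiL : L < (v :: vs').length := List.idxOf_lt_length_of_mem hmem
    have hsplit : v :: vs' = (v :: vs').take L ++ m :: (v :: vs').drop (L + 1) := by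
      rw [hL]; exact pv_split (v :: vs') m hmem
    have hl_lt : ∀ x ∈ (v :: vs').take L, m < x := by
      intro x hx
      have h1 : m ≤ x := hmle x (List.mem_of_mem_take hx)
      rcases h1.lt_or_eq with h | h
      · exact h
      · rw [← h] at hx
        rw [hL] at hx
        exact absurd hx (pv_not_mem_take_idxOf m (v :: vs'))
    have hr_le : ∀ x ∈ (v :: vs').drop (L + 1), m ≤ x :=
      fun x hx => hmle x (List.mem_of_mem_drop hx)
    have hs_le : ∀ y ∈ s, y ≤ m := by
      cases b with
      | none => rw [hb]; intro y hy; simp at hy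
      | some x => exact fun y hy => le_trans (hb.1 y hy) (hb.2.1 m hmem)
    obtain ⟨t', hS, ht'⟩ := pvS_high m ((v :: vs').take L) [] s hl_lt hs_le (by simp)
    have hlenl : ((v :: vs').take L).length ≤ n := by
      have := hiL
      simp only [List.length_take, List.length_cons] at *
      omega
    have hlenr : ((v :: vs').drop (L + 1)).length ≤ n := by
      have : (v :: vs').length ≤ n + 1 := hlen
      simp only [List.length_drop, List.length_cons] at *
      omega
    have hpst : pvPst (t' ++ s) m = m :: s.filter (fun y => decide (y < m)) := by
      have h1 : t'.filter (fun y => decide (y < m)) = [] :=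
        List.filter_eq_nil_iff.2 (fun y hy => by simpa using not_lt.2 (ht' y hy).le)
      simp [pvPst, List.filter_append, h1]
    have hPW2 : List.Pairwise (· > ·) (m :: s.filter (fun y => decide (y < m))) := by
      refine List.pairwise_cons.2 ⟨?_, hsPW.filter _⟩
      intro y hy
      simpa using (List.mem_filter.1 hy).2
    have ihl : pvCountB ((v :: vs').take L) (some m) = pvP ((v :: vs').take L) s :=
      ih _ (some m) s hlenl hsPW
        ⟨hs_le, fun x hx => (hl_lt x hx).le, Or.inr hl_lt⟩
    have ihr : pvCountB ((v :: vs').drop (L + 1)) (some m) =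
        pvP ((v :: vs').drop (L + 1)) (m :: s.filter (fun y => decide (y < m))) := by
      refine ih _ (some m) _ hlenr hPW2 ⟨?_, hr_le, Or.inl List.mem_cons_self⟩
      intro y hy
      rcases List.mem_cons.1 hy with h | h
      · exact h.le
      · exact (by simpa using (List.mem_filter.1 h).2 : y < m).le
    have hmt' : m ∉ t' := fun h => lt_irrefl m (ht' m h)
    have hind : (if Option.all (fun x => decide (x < m)) b then (1 : Int) else 0) =
        (if m ∈ t' ++ s then 0 else 1) := by
      cases b with
      | none =>
        rw [hb] at *
        simp [Option.all, hmt']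
      | some x =>
        obtain ⟨h1, h2, h3⟩ := hb
        have hxm : x ≤ m := h2 m hmem
        by_cases hlt : x < m
        · have hms : m ∉ s := fun h => absurd (h1 m h) (not_le.2 hlt)
          simp [hlt, List.mem_append, hmt', hms]
        · have hxe : x = m := le_antisymm hxm (not_lt.1 hlt)
          have hms : m ∈ s := by
            rcases h3 with h | h
            · exact hxe ▸ h
            · exact absurd (hxe ▸ h m hmem) (lt_irrefl m)
          simp [List.mem_append, hms, hlt]
    conv_rhs => rw [hsplit]
    rw [pvP_append]
    have hS' : pvS ((v :: vs').take L) s = t' ++ s := by simpa using hS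
    rw [hS']
    simp only [pvP]
    rw [hpst, ← ihl, ← ihr, hind]
    ring

-- ===== VERDICT (by name: the statement is the Claim_ definition above) =====
theorem calc_min_rectangle_count_spec : Claim_equal_calc_min_rectangle_count := by
  intro values _
  unfold Spec_calc_min_rectangle_count calc_min_rectangle_count_alt
  rw [pvA_eq_P]
  exact (pvMain values.length values none [] le_rfl (by simp) rfl).symm
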